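-- pv_equiv track=rewrite | github.com/tomerpeled1/Projecton | ArduinoCommunication.py | break_into_steps
-- ===== SOURCE A (Python) =====
-- def break_into_steps(total_steps, step_per_command):
--     """
--     Splits the total amount of steps into portions.
--     :param total_steps: total amount of steps to move
--     :param step_per_command: amount of steps in each command
--     :return: list of steps
--     """
--     steps_array = []
--     while step_per_command < total_steps:
--         steps_array += [step_per_command]
--         total_steps -= step_per_command
--     if total_steps > 0:
--         steps_array += [total_steps]
--     return steps_array
-- ===== SOURCE B (Python) =====
-- def break_into_steps(total_steps, step_per_command):
--     """
--     Splits the total amount of steps into portions.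
--     :param total_steps: total amount of steps to move
--     :param step_per_command: amount of steps in each command
--     :return: list of steps
--     """
--     if total_steps <= 0:
--         return []
--     full, rem = divmod(total_steps, step_per_command)
--     result = [step_per_command] * full
--     if rem > 0:
--         result.append(rem)
--     return result
-- ===== Notes on version B (the rewrite author's own statement) =====
-- stated objective: simpler
-- what changed: Replaced the repeated-subtraction loop with one divmod: full chunks by integer division plus the positive remainder.
import Mathlib
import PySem

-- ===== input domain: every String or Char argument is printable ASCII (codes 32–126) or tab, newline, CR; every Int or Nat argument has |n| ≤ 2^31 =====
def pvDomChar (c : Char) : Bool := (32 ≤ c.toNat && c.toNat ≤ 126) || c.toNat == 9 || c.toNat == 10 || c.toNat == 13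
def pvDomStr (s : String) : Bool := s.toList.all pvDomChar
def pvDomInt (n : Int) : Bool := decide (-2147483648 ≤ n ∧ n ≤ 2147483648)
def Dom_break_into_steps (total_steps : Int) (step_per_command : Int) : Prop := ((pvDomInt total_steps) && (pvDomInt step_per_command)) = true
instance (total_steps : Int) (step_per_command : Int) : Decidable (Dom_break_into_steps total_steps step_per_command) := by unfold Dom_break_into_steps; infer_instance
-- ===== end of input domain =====

-- B replaces A's repeated-subtraction loop by one floor-division/modulus (simpler);
-- Pre_ excludes step_per_command ≤ 0 with total_steps > step_per_command, where Python A loops forever.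


-- ===== PORT A =====
-- the while loop, with fuel making it total (fuel exhaustion is unreachable under Pre_: each
-- iteration subtracts step ≥ 1 from total, so total.toNat iterations suffice)
def breakLoopA : Nat → Int → Int → List Int → List Int
  | fuel, total, step, acc =>
    if step < total then
      match fuel with
      | 0 => acc
      | f + 1 => breakLoopA f (total - step) step (acc ++ [step])
    else if total > 0 then acc ++ [total] else acc

def break_into_steps (total_steps : Int) (step_per_command : Int) : List Int :=
  breakLoopA total_steps.toNat total_steps step_per_command []

-- ===== PORT B =====
def break_into_steps_alt (total_steps : Int) (step_per_command : Int) : List Int :=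
  if total_steps ≤ 0 then []
  else
    let full := PySem.Int.floordiv total_steps step_per_command
    let rem := PySem.Int.mod total_steps step_per_command
    let result := List.replicate full.toNat step_per_command
    if rem > 0 then result ++ [rem] else result

-- ===== PRECONDITION & SPEC =====
-- Pre_ excludes exactly the inputs where Python A never returns (infinite loop):
-- step_per_command ≤ 0 together with total_steps > step_per_command.
def Pre_break_into_steps (total_steps : Int) (step_per_command : Int) : Prop :=
  0 < step_per_command ∨ total_steps ≤ step_per_command
instance (total_steps : Int) (step_per_command : Int) : Decidable (Pre_break_into_steps total_steps step_per_command) := by unfold Pre_break_into_steps; infer_instance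
def pvWitness_break_into_steps : Int × Int := (10, 3)

def Spec_break_into_steps (total_steps : Int) (step_per_command : Int) (out : List Int) : Prop := out = break_into_steps_alt total_steps step_per_command
instance (total_steps : Int) (step_per_command : Int) (out : List Int) : Decidable (Spec_break_into_steps total_steps step_per_command out) := by unfold Spec_break_into_steps; infer_instance

-- ===== CLAIM (what is proved, stated in full; the proofs are below) =====
def Claim_equal_break_into_steps : Prop := ∀ (total_steps : Int) (step_per_command : Int), Dom_break_into_steps total_steps step_per_command → Pre_break_into_steps total_steps step_per_command → Spec_break_into_steps total_steps step_per_command (break_into_steps total_steps step_per_command)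

-- ===== LEMMAS AND PROOFS =====

-- peeling one chunk off B's closed form, for 0 < s < t
lemma alt_step {t s : Int} (hs : 0 < s) (hlt : s < t) :
    break_into_steps_alt t s = s :: break_into_steps_alt (t - s) s := by
  have ht : ¬ t ≤ 0 := by omega
  have ht' : ¬ t - s ≤ 0 := by omega
  unfold break_into_steps_alt
  rw [PySem.Int.floordiv_eq_ediv_of_pos hs, PySem.Int.mod_eq_emod_of_pos hs,
      PySem.Int.floordiv_eq_ediv_of_pos hs, PySem.Int.mod_eq_emod_of_pos hs]
  simp only [ht, ht', if_false]
  have hdiv : t / s = (t - s) / s + 1 := by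
    have := Int.add_mul_ediv_right (t - s) 1 (by omega : s ≠ 0)
    simp at this; omega
  have hmod : t % s = (t - s) % s := (Int.sub_emod_right t s).symm
  have hnn : 0 ≤ (t - s) / s := Int.ediv_nonneg (by omega) (by omega)
  rw [hdiv, hmod]
  have : (((t - s) / s + 1)).toNat = ((t - s) / s).toNat + 1 := by omega
  rw [this, List.replicate_succ]
  split <;> simp

-- the final (≤ one chunk) case, for 0 < t ≤ s
lemma alt_last {t s : Int} (hs : 0 < s) (h1 : 0 < t) (h2 : t ≤ s) :
    break_into_steps_alt t s = [t] := by
  unfold break_into_steps_alt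
  rw [PySem.Int.floordiv_eq_ediv_of_pos hs, PySem.Int.mod_eq_emod_of_pos hs]
  simp only [show ¬ t ≤ 0 by omega, if_false]
  rcases eq_or_lt_of_le h2 with rfl | hlt
  · rw [Int.ediv_self (by omega), Int.emod_self]
    simp
  · rw [Int.ediv_eq_zero_of_lt (by omega) hlt, Int.emod_eq_of_lt (by omega) hlt]
    simp [h1]

-- loop invariant: with positive step and enough fuel, the loop computes acc ++ B's value
lemma loopA_eq (fuel : Nat) (t s : Int) (acc : List Int) (hs : 0 < s) (hf : t ≤ (fuel : Int)) :
    breakLoopA fuel t s acc = acc ++ break_into_steps_alt t s := by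
  induction fuel generalizing t acc with
  | zero =>
    unfold breakLoopA
    have : ¬ s < t := by omega
    simp [this, show ¬ t > 0 by omega, break_into_steps_alt, show t ≤ 0 by omega]
  | succ f ih =>
    unfold breakLoopA
    by_cases hlt : s < t
    · simp only [hlt, if_true]
      rw [ih (t - s) (acc ++ [s]) (by omega), alt_step hs hlt]
      simp
    · simp only [hlt, if_false]
      by_cases hpos : t > 0
      · simp only [hpos, if_true]
        rw [alt_last hs hpos (by omega)]
      · simp [hpos, break_into_steps_alt, show t ≤ 0 by omega]

-- ===== VERDICT (by name: the statement is the Claim_ definition above) =====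
theorem break_into_steps_spec : Claim_equal_break_into_steps := by
  intro t s _ hpre
  unfold Spec_break_into_steps break_into_steps
  by_cases hs : 0 < s
  · rw [loopA_eq _ _ _ _ hs (by omega)]; simp
  · -- s ≤ 0, hence (by Pre_) t ≤ s ≤ 0: the guard is false at once and both sides are []
    have hle : t ≤ s := by rcases hpre with h | h <;> omega
    unfold breakLoopA
    simp [show ¬ s < t by omega, show ¬ t > 0 by omega, break_into_steps_alt, show t ≤ 0 by omega]
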